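-- pv_equiv track=rewrite | github.com/Ixsh/Advent_Of_Code | 2020/day6/solution.py | count_answers
-- ===== SOURCE A (Python) =====
-- def count_answers(answers, op = 1):
--     """
--     Finds the sum of the questions answered.
--     op = 1: Sums the counts of questions answered 'yes' by anyone in a group
--     op = 2: Sums the counts of questions answered 'yes' by all in a group
--     """
--     count = 0
--     for answer in answers:
--         if op == 1:
--             count += len(set(''.join(answer.split('\n'))))
--         elif op == 2:
--             count += len(set.intersection(*[set(elem) for elem in answer.split('\n')]))
--     return count
-- ===== SOURCE B (Python) =====
-- def count_answers(answers, op = 1):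
--     """Frequency-table reformulation: tally, per group, in how many lines each
--     character occurs (per-line distinct); op 1 counts distinct keys, op 2 counts
--     keys whose tally equals the number of lines."""
--     count = 0
--     for answer in answers:
--         lines = answer.split('\n')
--         tally = {}
--         for line in lines:
--             for ch in dict.fromkeys(line):
--                 tally[ch] = tally.get(ch, 0) + 1
--         if op == 1:
--             count += len(tally)
--         elif op == 2:
--             count += sum(1 for v in tally.values() if v == len(lines))
--     return count
-- ===== Notes on version B (the rewrite author's own statement) =====
-- stated objective: alternative
-- what changed: Replaces per-group set union / iterated set.intersection with a single frequency table tallying in how many lines each character occurs (per-line distinct): op 1 counts the table's keys, op 2 counts keys whose tally equals the number of lines.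
import Mathlib
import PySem

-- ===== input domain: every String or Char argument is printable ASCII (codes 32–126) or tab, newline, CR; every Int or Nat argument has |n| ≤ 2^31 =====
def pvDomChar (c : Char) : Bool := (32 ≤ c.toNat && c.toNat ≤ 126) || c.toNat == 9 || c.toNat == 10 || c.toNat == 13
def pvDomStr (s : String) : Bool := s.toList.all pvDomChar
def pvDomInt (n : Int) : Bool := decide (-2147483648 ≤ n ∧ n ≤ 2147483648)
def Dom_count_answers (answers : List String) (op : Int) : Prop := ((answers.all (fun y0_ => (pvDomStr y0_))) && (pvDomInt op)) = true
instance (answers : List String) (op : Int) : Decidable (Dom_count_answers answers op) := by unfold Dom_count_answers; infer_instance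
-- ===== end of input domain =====

-- B replaces set union/intersection by one per-group frequency table (how many lines contain each character) read against the line count; same cost, different data structure.

-- ===== PORT A =====
def count_answers (answers : List String) (op : Int) : Int :=
  answers.foldl (fun count answer =>
    if op = 1 then
      count + PySem.Set.len (PySem.Set.ofList
        (PySem.Chars.join [] (PySem.Chars.splitOn answer.toList ['\n'])))
    else if op = 2 then
      -- set.intersection(*[set(elem) for elem in answer.split('\n')]): fold the tail into the head
      match (PySem.Chars.splitOn answer.toList ['\n']).map (fun elem => PySem.Set.ofList elem) with
      | [] => count          -- unreachable: str.split always returns at least one piece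
      | s :: rest => count + PySem.Set.len (rest.foldl PySem.Set.inter s)
    else count) 0

-- ===== PORT B =====
def count_answers_alt (answers : List String) (op : Int) : Int :=
  answers.foldl (fun count answer =>
    let lines := PySem.Chars.splitOn answer.toList ['\n']
    let tally := lines.foldl (fun d line =>
      (PySem.List.dedup line).foldl (fun d ch => d.insert ch (d.getD ch 0 + 1)) d)
      PySem.Dict.empty
    if op = 1 then count + (tally.size : Int)
    else if op = 2 then
      count + (tally.values.map (fun v => if v = (lines.length : Int) then (1 : Int) else 0)).sum
    else count) 0

-- ===== PRECONDITION & SPEC =====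
def Spec_count_answers (answers : List String) (op : Int) (out : Int) : Prop := out = count_answers_alt answers op
instance (answers : List String) (op : Int) (out : Int) : Decidable (Spec_count_answers answers op out) := by unfold Spec_count_answers; infer_instance

-- ===== CLAIM (what is proved, stated in full; the proofs are below) =====
def Claim_equal_count_answers : Prop := ∀ (answers : List String) (op : Int), Dom_count_answers answers op → Spec_count_answers answers op (count_answers answers op)

-- ===== LEMMAS AND PROOFS =====

-- join with the empty separator is flatten
theorem join_nil_eq_flatten (ls : List (List Char)) : PySem.Chars.join [] ls = ls.flatten := by
  induction ls with
  | nil => simp [PySem.Chars.join_nil]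
  | cons a t ih =>
    cases t with
    | nil => simp [PySem.Chars.join_singleton]
    | cons b t' => rw [PySem.Chars.join_cons_cons]; simp_all

-- membership in the folded intersection
theorem mem_foldl_inter (rest : List (PySem.Set Char)) (s : PySem.Set Char) (c : Char) :
    c ∈ rest.foldl PySem.Set.inter s ↔ c ∈ s ∧ ∀ t ∈ rest, c ∈ t := by
  induction rest generalizing s with
  | nil => simp
  | cons t ts ih => simp [ih, PySem.Set.mem_inter]; tauto

theorem nodup_foldl_inter (rest : List (PySem.Set Char)) (s : PySem.Set Char) (h : s.Nodup) :
    (rest.foldl PySem.Set.inter s).Nodup := by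
  induction rest generalizing s with
  | nil => exact h
  | cons t ts ih => exact ih _ (PySem.Set.nodup_inter _ _ h)

-- B's tally is the counter of the per-line-deduped character stream
theorem tally_eq_counter (lines : List (List Char)) :
    lines.foldl (fun d line =>
      (PySem.List.dedup line).foldl (fun d ch => d.insert ch (d.getD ch 0 + 1)) d)
      PySem.Dict.empty = PySem.Dict.counter (lines.flatMap PySem.List.dedup) := by
  rw [← PySem.Dict.foldl_insert_getD_add_one_eq_counter, List.foldl_flatMap]

-- occurrence count in the deduped stream = number of lines containing the character
theorem count_occ (lines : List (List Char)) (c : Char) :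
    (lines.flatMap PySem.List.dedup).count c = lines.countP (fun l => decide (c ∈ l)) := by
  induction lines with
  | nil => simp
  | cons l t ih =>
    rw [List.flatMap_cons, List.count_append, List.countP_cons, ih]
    by_cases h : c ∈ l
    · rw [List.count_eq_one_of_mem (PySem.List.nodup_dedup l) ((PySem.List.mem_dedup l c).2 h)]
      simp [h]; omega
    · rw [List.count_eq_zero_of_not_mem (fun hm => h ((PySem.List.mem_dedup l c).1 hm))]
      simp [h]

-- per-group equality, op = 1
theorem group_op1 (lines : List (List Char)) :
    PySem.Set.len (PySem.Set.ofList (PySem.Chars.join [] lines)) =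
      ((PySem.Dict.counter (lines.flatMap PySem.List.dedup)).size : Int) := by
  have hperm : (PySem.Set.ofList (PySem.Chars.join [] lines)).Perm
      (PySem.Set.ofList (lines.flatMap PySem.List.dedup)) := by
    rw [List.perm_ext_iff_of_nodup (PySem.Set.nodup_ofList _) (PySem.Set.nodup_ofList _)]
    intro a
    simp [PySem.Set.mem_ofList, join_nil_eq_flatten, List.mem_flatten, List.mem_flatMap]
  have hsize : (PySem.Dict.counter (lines.flatMap PySem.List.dedup)).size
      = (PySem.Set.ofList (lines.flatMap PySem.List.dedup)).length := by
    unfold PySem.Dict.size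
    rw [PySem.Dict.items_counter, List.length_map]
  rw [hsize, PySem.Set.len, hperm.length_eq]

-- per-group equality, op = 2
theorem group_op2 (count : Int) (lines : List (List Char)) :
    (match lines.map (fun elem => PySem.Set.ofList elem) with
      | [] => count
      | s :: rest => count + PySem.Set.len (rest.foldl PySem.Set.inter s)) =
      count + ((PySem.Dict.counter (lines.flatMap PySem.List.dedup)).values.map
        (fun v => if v = (lines.length : Int) then (1 : Int) else 0)).sum := by
  cases lines with
  | nil => simp [PySem.Dict.values, PySem.Dict.items_counter]
  | cons l0 lrest =>
    -- rewrite the B side into a countP over the key set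
    have hvals : (PySem.Dict.counter ((l0 :: lrest).flatMap PySem.List.dedup)).values
        = (PySem.Set.ofList ((l0 :: lrest).flatMap PySem.List.dedup)).map
            (fun k => (List.count k ((l0 :: lrest).flatMap PySem.List.dedup) : Int)) := by
      unfold PySem.Dict.values
      rw [PySem.Dict.items_counter, List.map_map]
      rfl
    rw [hvals, List.map_map]
    have hsum := PySem.List.sum_map_ite_one_zero
      (fun k => decide ((List.count k ((l0 :: lrest).flatMap PySem.List.dedup) : Int)
        = ((l0 :: lrest).length : Int)))
      (PySem.Set.ofList ((l0 :: lrest).flatMap PySem.List.dedup))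
    simp only [decide_eq_true_eq] at hsum
    rw [show ((fun v => if v = (((l0 :: lrest).length : Nat) : Int) then (1 : Int) else 0) ∘
          fun k => (List.count k ((l0 :: lrest).flatMap PySem.List.dedup) : Int))
        = fun k => if (List.count k ((l0 :: lrest).flatMap PySem.List.dedup) : Int)
            = (((l0 :: lrest).length : Nat) : Int) then (1 : Int) else 0 from rfl]
    rw [hsum]
    -- both sides are count + a Nat cast; reduce to the Nat equality
    show count + PySem.Set.len ((lrest.map (fun elem => PySem.Set.ofList elem)).foldl
        PySem.Set.inter (PySem.Set.ofList l0)) = _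
    rw [PySem.Set.len]
    congr 1
    rw [Int.natCast_inj]
    rw [List.countP_eq_length_filter]
    apply List.Perm.length_eq
    rw [List.perm_ext_iff_of_nodup
      (nodup_foldl_inter _ _ (PySem.Set.nodup_ofList l0))
      ((PySem.Set.nodup_ofList _).filter _)]
    intro c
    rw [mem_foldl_inter, List.mem_filter]
    simp only [PySem.Set.mem_ofList, List.mem_map, decide_eq_true_eq, Int.natCast_inj,
      List.mem_flatMap, PySem.List.mem_dedup]
    constructor
    · rintro ⟨h0, hall⟩
      refine ⟨⟨l0, List.mem_cons_self, h0⟩, ?_⟩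
      rw [count_occ, List.countP_eq_length]
      intro l hl
      simp only [decide_eq_true_eq]
      rcases List.mem_cons.1 hl with rfl | hl
      · exact h0
      · exact (PySem.Set.mem_ofList l c).1 (hall (PySem.Set.ofList l) ⟨l, hl, rfl⟩)
    · rintro ⟨-, hall⟩
      rw [count_occ, List.countP_eq_length] at hall
      have h0 := hall l0 List.mem_cons_self
      simp only [decide_eq_true_eq] at h0
      refine ⟨h0, ?_⟩
      rintro t ⟨l, hl, rfl⟩
      have := hall l (List.mem_cons_of_mem _ hl)
      simpa using this

-- ===== VERDICT (by name: the statement is the Claim_ definition above) =====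
theorem count_answers_spec : Claim_equal_count_answers := by
  intro answers op _
  unfold Spec_count_answers count_answers count_answers_alt
  congr 1
  funext count answer
  simp only [tally_eq_counter]
  split_ifs with h1 h2
  · rw [group_op1]
  · exact group_op2 count _
  · rfl
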